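-- pv_equiv track=rewrite | github.com/yata0/Mahjong | p2_mahjong/calculate_fan_func.py | is_triple_chow
-- ===== SOURCE A (Python) =====
-- def is_triple_chow(state, player):
--     sequences = state["pile_sequences"] + state["hand_sequences"]
--     if len(sequences) < 3:
--         return False
--     seq_head_list = []
--     for sequence in sequences:
--         sequence = sorted(sequence)
--         seq_head_list.append(sequence[0])
--     for head in set(seq_head_list):
--         if seq_head_list.count(head) >= 3:
--             return True
--     return False
-- ===== SOURCE B (Python) =====
-- def is_triple_chow(state, player):
--     sequences = state["pile_sequences"] + state["hand_sequences"]
--     if len(sequences) < 3: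
--         return False
--     heads = sorted(min(seq) for seq in sequences)
--     return any(x == z for x, z in zip(heads, heads[2:]))
-- ===== Notes on version B (the rewrite author's own statement) =====
-- stated objective: alternative
-- what changed: B takes each meld's head with min(), sorts the head list once and detects a triple by a single adjacent-window pass (heads[i] == heads[i+2]) over the sorted heads, instead of A's per-meld sort followed by a set-then-.count() rescan of the head list.
import Mathlib
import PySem

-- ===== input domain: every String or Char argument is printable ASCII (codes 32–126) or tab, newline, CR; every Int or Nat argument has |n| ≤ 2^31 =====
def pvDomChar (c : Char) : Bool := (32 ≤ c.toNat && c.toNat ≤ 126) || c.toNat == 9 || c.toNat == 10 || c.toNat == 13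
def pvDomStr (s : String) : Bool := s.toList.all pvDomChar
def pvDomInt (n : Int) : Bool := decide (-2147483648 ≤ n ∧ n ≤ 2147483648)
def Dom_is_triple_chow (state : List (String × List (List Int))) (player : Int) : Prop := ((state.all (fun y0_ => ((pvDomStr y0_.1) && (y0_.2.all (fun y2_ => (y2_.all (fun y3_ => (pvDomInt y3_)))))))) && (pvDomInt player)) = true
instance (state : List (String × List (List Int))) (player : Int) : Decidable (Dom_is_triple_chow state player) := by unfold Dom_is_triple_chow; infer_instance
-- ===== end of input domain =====

-- B replaces A's per-meld sort + set-then-.count() rescan by min() heads, one sort of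
-- the head list and a single adjacent-window pass; equivalence is about the return value.

-- ===== PORT A =====
def is_triple_chow (state : List (String × List (List Int))) (player : Int) : Bool :=
  match state.lookup "pile_sequences", state.lookup "hand_sequences" with
  | some ps, some hs =>
      let sequences := ps ++ hs
      if sequences.length < 3 then false
      else
        let seq_head_list := sequences.foldl
          (fun acc sequence =>
            let s := PySem.List.sorted sequence (fun x => x) false
            -- sequence[0]: pyGet? is none only on an empty meld, where Python raises IndexError (outside Pre_)
            acc ++ [(PySem.List.pyGet? s 0).getD 0]) []
        (PySem.Set.ofList seq_head_list).any
          (fun head => decide (3 ≤ PySem.List.count seq_head_list head))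
  | _, _ => false  -- KeyError (outside Pre_)

-- ===== PORT B =====
def is_triple_chow_alt (state : List (String × List (List Int))) (player : Int) : Bool :=
  match state.lookup "pile_sequences" with
  | none => false  -- KeyError (outside Pre_)
  | some ps =>
    match state.lookup "hand_sequences" with
    | none => false  -- KeyError (outside Pre_)
    | some hs =>
      let sequences := ps ++ hs
      if sequences.length < 3 then false
      else
        -- min(s): min? is none only on an empty meld, where Python raises ValueError (outside Pre_)
        let heads := PySem.List.sorted
          (sequences.map (fun s => (PySem.List.min? s (fun x => x)).getD 0)) (fun x => x) false
        -- zip(heads, heads[2:]) and any(x == z)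
        (heads.zip (PySem.List.slice heads (some 2) none)).any (fun p => p.1 == p.2)

-- ===== PRECONDITION & SPEC =====
-- Pre_ excludes exactly the inputs where A raises: a missing "pile_sequences"/"hand_sequences"
-- key (KeyError) or an empty meld that is actually reached, i.e. when there are ≥ 3 melds (IndexError).
def Pre_is_triple_chow (state : List (String × List (List Int))) (player : Int) : Prop :=
  (state.lookup "pile_sequences").isSome = true ∧
  (state.lookup "hand_sequences").isSome = true ∧
  (let seqs := (state.lookup "pile_sequences").getD [] ++ (state.lookup "hand_sequences").getD []
   seqs.length < 3 ∨ ∀ s ∈ seqs, s ≠ [])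
instance (state : List (String × List (List Int))) (player : Int) : Decidable (Pre_is_triple_chow state player) := by unfold Pre_is_triple_chow; infer_instance

def pvWitness_is_triple_chow : (List (String × List (List Int))) × Int :=
  ([("pile_sequences", [[3, 1, 2], [1, 2, 3]]), ("hand_sequences", [[2, 3, 1], [4, 5, 6]])], 0)

def Spec_is_triple_chow (state : List (String × List (List Int))) (player : Int) (out : Bool) : Prop := out = is_triple_chow_alt state player
instance (state : List (String × List (List Int))) (player : Int) (out : Bool) : Decidable (Spec_is_triple_chow state player out) := by unfold Spec_is_triple_chow; infer_instance

-- ===== CLAIM (what is proved, stated in full; the proofs are below) =====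
def Claim_equal_is_triple_chow : Prop := ∀ (state : List (String × List (List Int))) (player : Int), Dom_is_triple_chow state player → Pre_is_triple_chow state player → Spec_is_triple_chow state player (is_triple_chow state player)

-- ===== LEMMAS AND PROOFS =====

-- head of sorted = min, on a nonempty meld
lemma sorted_head_eq_min (s : List Int) (h : s ≠ []) :
    (PySem.List.pyGet? (PySem.List.sorted s (fun x => x) false) 0).getD 0
      = (PySem.List.min? s (fun x => x)).getD 0 := by
  obtain ⟨m, t, hst⟩ : ∃ m t, PySem.List.sorted s (fun x => x) false = m :: t := by
    cases hs : PySem.List.sorted s (fun x => x) false with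
    | nil => exact absurd ((PySem.List.sorted_eq_nil_iff _ _ _).mp hs) h
    | cons a b => exact ⟨a, b, rfl⟩
  obtain ⟨m', hm'⟩ : ∃ m', PySem.List.min? s (fun x => x) = some m' := by
    cases hmin : PySem.List.min? s (fun x => x) with
    | none => exact absurd ((PySem.List.min?_eq_none_iff _ _).mp hmin) h
    | some a => exact ⟨a, rfl⟩
  have hmem : m ∈ s := (PySem.List.mem_sorted _ _ _ _).mp (by rw [hst]; exact List.mem_cons_self)
  have h1 : m ≤ m' := PySem.List.key_head_sorted_le s (fun x => x) hst m' (PySem.List.min?_mem hm')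
  have h2 : m' ≤ m := PySem.List.min?_isMin hm' m hmem
  rw [hst, PySem.List.pyGet?_zero_cons, hm']
  simp [le_antisymm h1 h2]

-- in a nondecreasing list, an element equal to the one two ahead ⟺ some value occurs ≥ 3 times
lemma window_iff (S : List Int) (hp : S.Pairwise (· ≤ ·)) :
    ((S.zip (S.drop 2)).any (fun p => p.1 == p.2) = true) ↔ ∃ h : Int, 3 ≤ S.count h := by
  induction S with
  | nil => simp
  | cons a S' ih =>
    match S', hp, ih with
    | [], _, _ =>
      refine iff_of_false (by simp) ?_
      rintro ⟨h, hcnt⟩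
      have hle : List.count h [a] ≤ [a].length := List.count_le_length
      simp only [List.length_cons, List.length_nil] at hle
      omega
    | [b], _, _ =>
      refine iff_of_false (by simp) ?_
      rintro ⟨h, hcnt⟩
      have hle : List.count h [a, b] ≤ [a, b].length := List.count_le_length
      simp only [List.length_cons, List.length_nil] at hle
      omega
    | b :: c :: t, hp, ih =>
      rw [List.pairwise_cons] at hp
      obtain ⟨ha, hp'⟩ := hp
      have hbc : (b :: c :: t).Pairwise (· ≤ ·) := hp'
      rw [List.pairwise_cons] at hp'
      obtain ⟨hb, hp''⟩ := hp'
      rw [List.pairwise_cons] at hp''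
      obtain ⟨hc, _⟩ := hp''
      have ihh := ih hbc
      have hdrop : (b :: c :: t).drop 2 = t := rfl
      rw [hdrop] at ihh
      have hzip : ((a :: b :: c :: t).zip ((a :: b :: c :: t).drop 2))
          = (a, c) :: ((b :: c :: t).zip t) := rfl
      rw [hzip, List.any_cons, Bool.or_eq_true, ihh]
      constructor
      · intro hor
        rcases hor with heq | hex
        · -- a = c, so a = b = c: count a ≥ 3
          have hac : a = c := by simpa using heq
          have hab : a = b := le_antisymm (ha b List.mem_cons_self)
            (hac ▸ hb c List.mem_cons_self)
          refine ⟨a, ?_⟩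
          rw [← hab, ← hac]
          simp only [List.count_cons_self]
          omega
        · obtain ⟨h, hcnt⟩ := hex
          refine ⟨h, ?_⟩
          have h5 : List.count h (a :: b :: c :: t) = List.count h (b :: c :: t) + if a == h then 1 else 0 :=
            List.count_cons ..
          rw [h5]; split <;> omega
      · rintro ⟨h, hcnt⟩
        by_cases hac : a = c
        · exact Or.inl (by simp [hac])
        · -- a < c; then a occurs at most twice in the whole list, so h ≠ a and the tail has it
          have halc : a < c := lt_of_le_of_ne (ha c (by simp)) hac
          have hct : (c :: t).count a = 0 := by
            refine List.count_eq_zero.mpr ?_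
            intro hmem
            rcases List.mem_cons.mp hmem with h1 | h1
            · exact hac h1
            · have := hc a h1; omega
          have hha : h ≠ a := by
            intro he
            rw [he] at hcnt
            have h3 : List.count a (a :: b :: c :: t) = List.count a (b :: c :: t) + 1 := by
              rw [List.count_cons]; simp
            have h4 : List.count a (b :: c :: t) = List.count a (c :: t) + if b == a then 1 else 0 :=
              List.count_cons ..
            rw [h3, h4, hct] at hcnt
            split at hcnt <;> omega
          refine Or.inr ⟨h, ?_⟩
          have h4 : List.count h (a :: b :: c :: t) = List.count h (b :: c :: t) + if a == h then 1 else 0 :=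
            List.count_cons ..
          rw [h4, if_neg (by simpa using Ne.symm hha)] at hcnt
          omega

-- ===== VERDICT (by name: the statement is the Claim_ definition above) =====
theorem is_triple_chow_spec : Claim_equal_is_triple_chow := by
  intro state player hdom hpre
  unfold Spec_is_triple_chow
  obtain ⟨hps, hhs, hrest⟩ := hpre
  obtain ⟨ps, hpseq⟩ := Option.isSome_iff_exists.mp hps
  obtain ⟨hs, hhseq⟩ := Option.isSome_iff_exists.mp hhs
  unfold is_triple_chow is_triple_chow_alt
  rw [hpseq, hhseq]
  simp only [hpseq, hhseq, Option.getD_some] at hrest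
  by_cases hlen : (ps ++ hs).length < 3
  · simp only [if_pos hlen]
  · rcases hrest with hlt | hne
    · omega
    simp only [if_neg hlen]
    have hmap : (ps ++ hs).foldl
        (fun acc sequence =>
          acc ++ [(PySem.List.pyGet? (PySem.List.sorted sequence (fun x => x) false) 0).getD 0]) []
        = (ps ++ hs).map (fun s => (PySem.List.min? s (fun x => x)).getD 0) := by
      rw [PySem.List.foldl_append_singleton_eq_map]
      exact List.map_congr_left (fun s hsmem => sorted_head_eq_min s (hne s hsmem))
    rw [hmap]
    set H := (ps ++ hs).map (fun s => (PySem.List.min? s (fun x => x)).getD 0) with hH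
    set S := PySem.List.sorted H (fun x => x) false with hS
    have hperm : S.Perm H := PySem.List.sorted_perm H (fun x => x) false
    have hpw : S.Pairwise (· ≤ ·) := PySem.List.sorted_pairwise H (fun x => x)
    have hslice : PySem.List.slice S (some 2) none = S.drop 2 := by
      rw [PySem.List.slice_from S (a := 2) (by norm_num)]
      rfl
    rw [hslice, Bool.eq_iff_iff, window_iff S hpw]
    simp only [List.any_eq_true, decide_eq_true_eq, PySem.Set.mem_ofList _ _]
    constructor
    · rintro ⟨h, hmem, hcnt⟩
      refine ⟨h, ?_⟩
      rw [PySem.List.count_eq] at hcnt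
      rw [hperm.count_eq]
      omega
    · rintro ⟨h, hcnt⟩
      rw [hperm.count_eq] at hcnt
      refine ⟨h, ?_, ?_⟩
      · exact List.count_pos_iff.mp (by omega)
      · rw [PySem.List.count_eq]; omega
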